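-- pv_equiv track=rewrite | github.com/coblan/helpers | func/collection/mylist.py | slice_names
-- ===== SOURCE A (Python) =====
-- def slice_names(names,start,end):
--     """
--     @names:['name1','name2','name3','name4']
--     @start: name2
--     @end:   name4
--
--     返回 :[name2,name3,name4]
--     """
--     out =[]
--     inn = False
--     for name in names:
--         if name ==start:
--             inn = True
--         if inn:
--             out.append(name)
--         if name ==end:
--             inn =False
--             break
--     return out
-- ===== SOURCE B (Python) =====
-- def slice_names(names, start, end):
--     try:
--         s = names.index(start)
--     except ValueError:
--         return []
--     try:
--         e = names.index(end)
--     except ValueError: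
--         return names[s:]
--     if e < s:
--         return []
--     return names[s:e + 1]
-- ===== Notes on version B (the rewrite author's own statement) =====
-- stated objective: simpler
-- what changed: Replaces the stateful flag-loop (inn/out with break) by two positional index lookups and a single slice, with early returns for the absent-start, absent-end and end-before-start cases.
import Mathlib
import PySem

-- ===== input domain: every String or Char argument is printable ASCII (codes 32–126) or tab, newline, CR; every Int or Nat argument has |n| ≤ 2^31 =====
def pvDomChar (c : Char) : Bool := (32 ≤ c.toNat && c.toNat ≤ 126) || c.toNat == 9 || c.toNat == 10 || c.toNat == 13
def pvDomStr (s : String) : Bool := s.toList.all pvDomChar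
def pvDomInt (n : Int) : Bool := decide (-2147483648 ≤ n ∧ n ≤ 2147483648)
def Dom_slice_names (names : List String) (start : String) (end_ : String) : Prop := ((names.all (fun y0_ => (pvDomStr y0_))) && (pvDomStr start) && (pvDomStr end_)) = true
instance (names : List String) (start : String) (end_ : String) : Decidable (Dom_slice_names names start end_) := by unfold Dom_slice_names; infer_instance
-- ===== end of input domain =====

-- B replaces A's stateful flag-loop by two index lookups and one slice (objective: simpler).


-- ===== PORT A =====
-- the for-loop with its 'break': state is (out, inn); returning at 'break'
def sliceLoop (start end_ : String) : List String → List String → Bool → List String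
  | [], out, _ => out
  | n :: rest, out, inn =>
    let inn' := if n == start then true else inn
    let out' := if inn' then out ++ [n] else out
    if n == end_ then out' else sliceLoop start end_ rest out' inn'

def slice_names (names : List String) (start : String) (end_ : String) : List String :=
  sliceLoop start end_ names [] false

-- ===== PORT B =====
def slice_names_alt (names : List String) (start : String) (end_ : String) : List String :=
  match PySem.List.index? names start with
  | none => []
  | some s =>
    match PySem.List.index? names end_ with
    | none => PySem.List.slice names (some (s : Int)) none
    | some e =>
      if e < s then []
      else PySem.List.slice names (some (s : Int)) (some ((e : Int) + 1))

-- ===== PRECONDITION & SPEC =====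
def Spec_slice_names (names : List String) (start : String) (end_ : String) (out : List String) : Prop := out = slice_names_alt names start end_
instance (names : List String) (start : String) (end_ : String) (out : List String) : Decidable (Spec_slice_names names start end_ out) := by unfold Spec_slice_names; infer_instance

-- ===== CLAIM (what is proved, stated in full; the proofs are below) =====
def Claim_equal_slice_names : Prop := ∀ (names : List String) (start : String) (end_ : String), Dom_slice_names names start end_ → Spec_slice_names names start end_ (slice_names names start end_)

-- ===== LEMMAS AND PROOFS =====

-- prefix of xs up to and including the first occurrence of v (all of xs if absent)
def takeThrough (v : String) : List String → List String
  | [] => []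
  | n :: rest => if n == v then [n] else n :: takeThrough v rest

-- once inn is true, the loop appends every element up to and including the first end_
theorem sliceLoop_true (start end_ : String) (names out : List String) :
    sliceLoop start end_ names out true = out ++ takeThrough end_ names := by
  induction names generalizing out with
  | nil => simp [sliceLoop, takeThrough]
  | cons n rest ih =>
    simp only [sliceLoop, takeThrough]
    by_cases he : n == end_ <;> simp [he, ih]

theorem takeThrough_of_not_mem (end_ : String) (xs : List String) (h : end_ ∉ xs) :
    takeThrough end_ xs = xs := by
  induction xs with
  | nil => rfl
  | cons n rest ih =>
    simp only [List.mem_cons, not_or] at h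
    have hne : (n == end_) = false := beq_eq_false_iff_ne.mpr (fun hh => h.1 hh.symm)
    simp [takeThrough, hne, ih h.2]

theorem takeThrough_of_index (end_ : String) (xs : List String) (k : Nat)
    (h : PySem.List.index? xs end_ = some k) :
    takeThrough end_ xs = xs.take (k + 1) := by
  induction xs generalizing k with
  | nil => simp [PySem.List.index?_eq_idxOf?, List.idxOf?] at h
  | cons n rest ih =>
    by_cases hn : n = end_
    · subst hn
      rw [PySem.List.index?_cons_self] at h
      cases h
      simp [takeThrough]
    · have hbe : (n == end_) = false := by simp [hn]
      rw [PySem.List.index?_cons_of_ne _ hn] at h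
      cases hk : PySem.List.index? rest end_ with
      | none => rw [hk] at h; simp at h
      | some k' =>
        rw [hk] at h
        simp at h
        subst h
        simp [takeThrough, hbe, ih k' hk]

theorem slice_names_eq_alt (names : List String) (start end_ : String) :
    slice_names names start end_ = slice_names_alt names start end_ := by
  induction names with
  | nil => rfl
  | cons n rest ih =>
    by_cases hs : n = start
    · subst hs
      by_cases he : n = end_
      · -- start at head, end at head: A returns [n]
        subst he
        unfold slice_names_alt
        rw [PySem.List.index?_cons_self]
        have hsl := PySem.List.slice_toNat (n :: rest) (a := (0 : Int)) (b := (1 : Int))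
          (by omega) (by omega)
        simp [slice_names, sliceLoop, hsl]
      · have hbe : (n == end_) = false := by simp [he]
        have hA : slice_names (n :: rest) n end_ = [n] ++ takeThrough end_ rest := by
          simp only [slice_names, sliceLoop, beq_self_eq_true, if_true, hbe,
            Bool.false_eq_true, if_false, List.nil_append]
          exact sliceLoop_true n end_ rest [n]
        rw [hA]
        unfold slice_names_alt
        rw [PySem.List.index?_cons_self, PySem.List.index?_cons_of_ne _ he]
        cases hk : PySem.List.index? rest end_ with
        | none =>
          have hmem : end_ ∉ rest := (PySem.List.index?_eq_none_iff _ _).mp hk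
          have hsl := PySem.List.slice_from (n :: rest) (a := (0 : Int)) (by omega)
          simp [takeThrough_of_not_mem end_ rest hmem, hsl]
        | some k =>
          have h1 : takeThrough end_ rest = rest.take (k + 1) :=
            takeThrough_of_index end_ rest k hk
          have hsl := PySem.List.slice_toNat (n :: rest) (a := (0 : Int))
            (b := ((k : Int) + 1) + 1) (by omega) (by omega)
          have h2 : ((((k : Int) + 1) + 1).toNat) = k + 2 := by omega
          simp [hsl, h1, h2, List.take_succ_cons]
    · have hbs : (n == start) = false := by simp [hs]
      by_cases he : n = end_
      · -- end met before start is seen: A breaks with out = []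
        subst he
        have hA : slice_names (n :: rest) start n = [] := by
          simp [slice_names, sliceLoop, hbs]
        rw [hA]
        unfold slice_names_alt
        rw [PySem.List.index?_cons_of_ne _ hs, PySem.List.index?_cons_self]
        cases hk : PySem.List.index? rest start with
        | none => simp
        | some s => simp
      · have hbe : (n == end_) = false := by simp [he]
        have hA : slice_names (n :: rest) start end_ = slice_names rest start end_ := by
          simp [slice_names, sliceLoop, hbs, hbe]
        rw [hA, ih]
        unfold slice_names_alt
        rw [PySem.List.index?_cons_of_ne _ hs, PySem.List.index?_cons_of_ne _ he]
        cases hks : PySem.List.index? rest start with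
        | none => simp
        | some s =>
          cases hke : PySem.List.index? rest end_ with
          | none =>
            simp only [Option.map_some, Nat.cast_add, Nat.cast_one]
            have hsl1 := PySem.List.slice_from rest (a := (s : Int)) (by omega)
            have hsl2 := PySem.List.slice_from (n :: rest) (a := ((s : Int) + 1)) (by omega)
            have h1 : ((s : Int) + 1).toNat = s + 1 := by omega
            simp [hsl1, hsl2, h1]
          | some e =>
            simp only [Option.map_some, Nat.cast_add, Nat.cast_one]
            by_cases hlt : e < s
            · rw [if_pos hlt, if_pos (by omega)]
            · rw [if_neg hlt, if_neg (by omega)]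
              have hsl1 := PySem.List.slice_toNat rest (a := (s : Int))
                (b := (e : Int) + 1) (by omega) (by omega)
              have hsl2 := PySem.List.slice_toNat (n :: rest) (a := (s : Int) + 1)
                (b := ((e : Int) + 1) + 1) (by omega) (by omega)
              have h1 : ((s : Int) + 1).toNat = s + 1 := by omega
              have h2 : (((e : Int) + 1) + 1).toNat = e + 2 := by omega
              have h3 : ((e : Int) + 1).toNat = e + 1 := by omega
              have h4 : ((s : Int)).toNat = s := by omega
              rw [hsl1, hsl2, h1, h2, h3, h4]
              simp only [List.drop_succ_cons]
              congr 1
              omega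

-- ===== VERDICT (by name: the statement is the Claim_ definition above) =====
theorem slice_names_spec : Claim_equal_slice_names := by
  intro names start end_ _
  exact slice_names_eq_alt names start end_
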